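-- pv_equiv track=rewrite | github.com/pypi-data/pypi-mirror-328 | packages/pyunixlzw/pyunixlzw-1.0.0.0.tar.gz/pyunixlzw-1.0.0.0/src/pyunixlzw/compress.py | get_next_byte
-- ===== SOURCE A (Python) =====
-- def get_next_byte(output_code, output_int_buf, remaining_bit_count, cur_bit_len):
--     """Returns the next output byte alongside buffer tracking information.
--
--     Parameters:
--     - `int` output_code
--         - The code from our code table that we want to add to our compressed stream
--     - `int` output_int_buf
--         - The current single byte buffer that may contain bits from a previous output
--           code
--     - `int` remaining_bit_count
--         - The remaining bits that we need to fill in the current single byte buffer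
--     - `int` cur_bit_len
--         - The current bit length for codes in our table
--
--     Return:
--     - `tuple[list[int], int, int]`
--         - The list of bytes that can be output to the compressed stream from the given code
--         - The updated single byte buffer that contains the leftover bits
--         - The updated remaining bits needed to fill the rest of the single byte buffer
--     """
--     # Since bit length > 8, we will always be able to output at least one byte
--     output_bytes = [
--         # Add bits that already existed in our output buffer to...
--         output_int_buf + (
--             # our output code bit shifted by the bits that have already been read...
--             (output_code << (8 - remaining_bit_count)) &
--             # masked to only include the bits that we need to read
--             (((2 ** (8 - remaining_bit_count)) - 1) ^ 0xff)
--         )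
--     ]
--     # Shift out the bits we have already read
--     output_code >>= remaining_bit_count
--     # Update our remaining bit count
--     remaining_bit_count = cur_bit_len - remaining_bit_count
--
--     # Continue adding bytes to our output byte buffer while we can
--     while remaining_bit_count > 8:
--         # Append the last 8 LSBs of our output code to the existing output byte buffer
--         output_bytes.append(output_code & 0xff)
--         # Shift out 8 bits
--         output_code >>= 8
--         # Update our remaining bit count
--         remaining_bit_count -= 8
--
--     # We can read one more byte before outputting our byte buffer
--     if remaining_bit_count == 8:
--         # Add the remaining bits of the output_code as a full byte to our byte buffer
--         output_bytes.append(output_code)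
--         # Clear the single byte buffer
--         output_int_buf = 0
--     # Leverage single byte buffer
--     else:
--         # Put left over bits into the single byte buffer
--         output_int_buf = output_code & (2 ** (remaining_bit_count) - 1)
--         # Update for bits we will need to continue reading later
--         remaining_bit_count = 8 - remaining_bit_count
--
--     return (output_bytes, output_int_buf, remaining_bit_count)
-- ===== SOURCE B (Python) =====
-- def get_next_byte(output_code, output_int_buf, remaining_bit_count, cur_bit_len):
--     """Treat buffer bits + code as one combined integer and convert its full
--     bytes at once with int.to_bytes (little-endian), instead of A's special-
--     cased first byte followed by a shift-and-mutate while loop."""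
--     used = 8 - remaining_bit_count
--     combined = output_code << used
--     nfull, leftover = divmod(used + cur_bit_len, 8)
--     out = list((combined & ((1 << (8 * nfull)) - 1)).to_bytes(nfull, 'little'))
--     out[0] += output_int_buf
--     if leftover:
--         return (out, (combined >> (8 * nfull)) & ((1 << leftover) - 1), 8 - leftover)
--     return (out, 0, 8)
-- ===== Notes on version B (the rewrite author's own statement) =====
-- stated objective: alternative
-- what changed: B merges the buffer bits and the code into one combined integer and converts all full bytes at once with int.to_bytes(nfull,'little') plus one divmod for the bit accounting, replacing A's special-cased first byte, shift-and-mutate while loop and duplicated tail branches.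
-- intended difference: When the code fills whole bytes exactly ((cur_bit_len-remaining_bit_count)%8==0 with cur_bit_len>remaining_bit_count) and output_code is negative or has bits above cur_bit_len, A appends its final byte without the &0xff mask and so emits a value outside 0..255 (e.g. -1), while B masks every emitted byte to a real byte, which is what a compressed byte stream requires. — e.g. on get_next_byte(-1, 0, 0, 8): A returns ([0, -1], 0, 8), B returns ([0, 255], 0, 8)
import Mathlib
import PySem

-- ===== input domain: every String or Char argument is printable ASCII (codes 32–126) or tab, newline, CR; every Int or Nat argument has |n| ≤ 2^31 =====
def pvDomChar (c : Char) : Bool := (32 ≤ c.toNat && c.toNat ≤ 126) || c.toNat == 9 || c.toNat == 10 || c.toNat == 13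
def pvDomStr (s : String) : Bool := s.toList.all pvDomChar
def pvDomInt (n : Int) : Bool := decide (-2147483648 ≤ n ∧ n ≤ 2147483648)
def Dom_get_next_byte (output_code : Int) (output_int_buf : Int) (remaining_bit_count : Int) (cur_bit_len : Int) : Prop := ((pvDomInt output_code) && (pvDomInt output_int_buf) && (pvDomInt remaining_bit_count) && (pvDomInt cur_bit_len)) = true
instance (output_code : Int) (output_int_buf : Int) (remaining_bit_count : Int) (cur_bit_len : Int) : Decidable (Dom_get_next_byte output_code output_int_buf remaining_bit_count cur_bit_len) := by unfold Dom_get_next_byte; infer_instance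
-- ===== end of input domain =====

-- B treats the buffer bits and the code as ONE combined integer and converts all its
-- full bytes at once (int.to_bytes little-endian) with a single divmod for the bit
-- accounting, replacing A's special-cased first byte, shift-and-mutate while loop and
-- duplicated tail branches (objective: alternative).
-- Python's x << k / x >> k are core Lean's <<< / >>> on Int (exact, incl. negative x);
-- shift counts go through .toNat: Python raises on a negative shift count
-- (and 2**negative is a float), which Pre_ excludes, so both ports are exact on Pre_.

-- ===== PORT A =====
-- the while-loop of A; state (output_code, remaining_bit_count, output_bytes) as in the Python
def gnbLoop (output_code : Int) (remaining_bit_count : Int) (output_bytes : List Int) : Int × Int × List Int :=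
  if remaining_bit_count > 8 then
    gnbLoop (output_code >>> (8:Nat)) (remaining_bit_count - 8)
      (output_bytes ++ [PySem.Int.band output_code 0xff])
  else (output_code, remaining_bit_count, output_bytes)
termination_by remaining_bit_count.toNat
decreasing_by omega

def get_next_byte (output_code : Int) (output_int_buf : Int) (remaining_bit_count : Int) (cur_bit_len : Int) : List Int × Int × Int :=
  let output_bytes : List Int :=
    [output_int_buf +
      PySem.Int.band (output_code <<< (8 - remaining_bit_count).toNat)
        (PySem.Int.bxor (2 ^ (8 - remaining_bit_count).toNat - 1) 0xff)]
  let output_code1 := output_code >>> remaining_bit_count.toNat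
  let rem1 := cur_bit_len - remaining_bit_count
  match gnbLoop output_code1 rem1 output_bytes with
  | (oc2, rem2, bytes) =>
    if rem2 = 8 then (bytes ++ [oc2], 0, 8)
    else (bytes, PySem.Int.band oc2 (2 ^ rem2.toNat - 1), 8 - rem2)

-- ===== PORT B =====
-- int.to_bytes(n, 'little') as a list of ints; exact for 0 ≤ x < 2^(8n),
-- which B's call site guarantees by masking x to 8n bits first
def pyToBytesLE (x : Int) (n : Nat) : List Int :=
  (List.range n).map (fun i => PySem.Int.band (x >>> (8 * i : Nat)) 0xff)

def get_next_byte_alt (output_code : Int) (output_int_buf : Int) (remaining_bit_count : Int) (cur_bit_len : Int) : List Int × Int × Int :=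
  let used := 8 - remaining_bit_count
  let combined := output_code <<< used.toNat
  let nfull := PySem.Int.floordiv (used + cur_bit_len) 8
  let leftover := PySem.Int.mod (used + cur_bit_len) 8
  let out := pyToBytesLE (PySem.Int.band combined ((1:Int) <<< (8 * nfull).toNat - 1)) nfull.toNat
  -- out[0] += output_int_buf  (IndexError on an empty list; under Pre_ out is never empty)
  let out : List Int := match out with
    | [] => []
    | b0 :: rest => (b0 + output_int_buf) :: rest
  if leftover ≠ 0 then
    (out, PySem.Int.band (combined >>> (8 * nfull).toNat) ((1:Int) <<< leftover.toNat - 1), 8 - leftover)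
  else
    (out, 0, 8)

-- ===== PRECONDITION & SPEC =====
-- exactly the inputs on which the Python A returns: outside it A raises
-- (ValueError on a negative shift count, or TypeError from 2**negative being a float)
def Pre_get_next_byte (output_code : Int) (output_int_buf : Int) (remaining_bit_count : Int) (cur_bit_len : Int) : Prop :=
  0 ≤ remaining_bit_count ∧ remaining_bit_count ≤ 8 ∧ remaining_bit_count ≤ cur_bit_len
instance (output_code : Int) (output_int_buf : Int) (remaining_bit_count : Int) (cur_bit_len : Int) : Decidable (Pre_get_next_byte output_code output_int_buf remaining_bit_count cur_bit_len) := by unfold Pre_get_next_byte; infer_instance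

def pvWitness_get_next_byte : Int × Int × Int × Int := (257, 3, 5, 9)

-- When the code fills whole bytes exactly (cur_bit_len > remaining_bit_count and
-- 8 ∣ cur_bit_len - remaining_bit_count) and output_code is negative or has bits above
-- cur_bit_len, A appends its final byte WITHOUT the &0xff mask and so emits a value
-- outside 0..255 (e.g. -1), while B masks every emitted byte to a real byte, which is
-- what a compressed byte stream requires.
def D_get_next_byte (output_code : Int) (output_int_buf : Int) (remaining_bit_count : Int) (cur_bit_len : Int) : Prop :=
  remaining_bit_count < cur_bit_len ∧ (cur_bit_len - remaining_bit_count) % 8 = 0 ∧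
    output_code >>> cur_bit_len.toNat ≠ 0
instance (output_code : Int) (output_int_buf : Int) (remaining_bit_count : Int) (cur_bit_len : Int) : Decidable (D_get_next_byte output_code output_int_buf remaining_bit_count cur_bit_len) := by unfold D_get_next_byte; infer_instance

def Spec_get_next_byte (output_code : Int) (output_int_buf : Int) (remaining_bit_count : Int) (cur_bit_len : Int) (out : List Int × Int × Int) : Prop := ¬ D_get_next_byte output_code output_int_buf remaining_bit_count cur_bit_len → out = get_next_byte_alt output_code output_int_buf remaining_bit_count cur_bit_len
instance (output_code : Int) (output_int_buf : Int) (remaining_bit_count : Int) (cur_bit_len : Int) (out : List Int × Int × Int) : Decidable (Spec_get_next_byte output_code output_int_buf remaining_bit_count cur_bit_len out) := by unfold Spec_get_next_byte; infer_instance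

def pvDiffWitness_get_next_byte : Int × Int × Int × Int := (-1, 0, 0, 8)
def pvDiffWitnessOut_get_next_byte : (List Int × Int × Int) × (List Int × Int × Int) :=
  (([0, -1], 0, 8), ([0, 255], 0, 8))

-- ===== CLAIM (what is proved, stated in full; the proofs are below) =====
def Claim_unchanged_get_next_byte : Prop := ∀ (output_code : Int) (output_int_buf : Int) (remaining_bit_count : Int) (cur_bit_len : Int), Dom_get_next_byte output_code output_int_buf remaining_bit_count cur_bit_len → Pre_get_next_byte output_code output_int_buf remaining_bit_count cur_bit_len → Spec_get_next_byte output_code output_int_buf remaining_bit_count cur_bit_len (get_next_byte output_code output_int_buf remaining_bit_count cur_bit_len)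
def Claim_changed_get_next_byte : Prop := Dom_get_next_byte (pvDiffWitness_get_next_byte.1) (pvDiffWitness_get_next_byte.2.1) (pvDiffWitness_get_next_byte.2.2.1) (pvDiffWitness_get_next_byte.2.2.2) ∧ Pre_get_next_byte (pvDiffWitness_get_next_byte.1) (pvDiffWitness_get_next_byte.2.1) (pvDiffWitness_get_next_byte.2.2.1) (pvDiffWitness_get_next_byte.2.2.2) ∧ D_get_next_byte (pvDiffWitness_get_next_byte.1) (pvDiffWitness_get_next_byte.2.1) (pvDiffWitness_get_next_byte.2.2.1) (pvDiffWitness_get_next_byte.2.2.2) ∧ get_next_byte (pvDiffWitness_get_next_byte.1) (pvDiffWitness_get_next_byte.2.1) (pvDiffWitness_get_next_byte.2.2.1) (pvDiffWitness_get_next_byte.2.2.2) = pvDiffWitnessOut_get_next_byte.1 ∧ get_next_byte_alt (pvDiffWitness_get_next_byte.1) (pvDiffWitness_get_next_byte.2.1) (pvDiffWitness_get_next_byte.2.2.1) (pvDiffWitness_get_next_byte.2.2.2) = pvDiffWitnessOut_get_next_byte.2 ∧ pvDiffWitnessOut_get_next_byte.1 ≠ pvDiffWitnessOut_get_next_byt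e.2
def Claim_exact_get_next_byte : Prop := ∀ (output_code : Int) (output_int_buf : Int) (remaining_bit_count : Int) (cur_bit_len : Int), Dom_get_next_byte output_code output_int_buf remaining_bit_count cur_bit_len → Pre_get_next_byte output_code output_int_buf remaining_bit_count cur_bit_len → D_get_next_byte output_code output_int_buf remaining_bit_count cur_bit_len → get_next_byte output_code output_int_buf remaining_bit_count cur_bit_len ≠ get_next_byte_alt output_code output_int_buf remaining_bit_count cur_bit_len

-- ===== LEMMAS AND PROOFS =====

lemma natAnd_shiftLeft (a c u : Nat) : (a <<< u) &&& c = (a &&& (c >>> u)) <<< u := by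
  apply Nat.eq_of_testBit_eq
  intro i
  rw [Nat.testBit_and, Nat.testBit_shiftLeft, Nat.testBit_shiftLeft, Nat.testBit_and,
    Nat.testBit_shiftRight]
  by_cases h : u ≤ i
  · have hui : u + (i - u) = i := by omega
    simp [ge_iff_le, h, hui]
  · simp [ge_iff_le, h]

lemma bandM (x : Int) (k : Nat) : PySem.Int.band x (2 ^ k - 1) = x % 2 ^ k := by
  have hcast : ((2:Int) ^ k) = ((2 ^ k : Nat) : Int) := by push_cast; ring
  have hkpos : (1:Nat) ≤ 2 ^ k := Nat.one_le_two_pow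
  have hm : (0:Int) ≤ 2 ^ k - 1 := by omega
  have hmt : ((2:Int) ^ k - 1).toNat = 2 ^ k - 1 := by omega
  by_cases hx : 0 ≤ x
  · simp only [PySem.Int.band, if_pos hx, if_pos hm, hmt]
    rw [Nat.and_two_pow_sub_one_eq_mod]
    conv_rhs => rw [← Int.toNat_of_nonneg hx]
    push_cast
    ring
  · push Not at hx
    simp only [PySem.Int.band, if_neg (not_le.2 hx), if_pos hm, hmt]
    set y := (-x - 1).toNat with hy
    have hyx : (y : Int) = -x - 1 := by omega
    rw [Nat.land_comm, Nat.and_two_pow_sub_one_eq_mod]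
    have hsplit : (↑(y / 2 ^ k) * 2 ^ k + ↑(y % 2 ^ k) : Int) = (y : Int) := by
      exact_mod_cast Nat.div_add_mod' y (2 ^ k)
    have hx2 : x = (2 ^ k - 1 - ↑(y % 2 ^ k)) + 2 ^ k * (-(↑(y / 2 ^ k)) - 1) := by
      linear_combination hsplit + hyx
    rw [hx2, Int.add_mul_emod_self_left]
    have hlt : y % 2 ^ k < 2 ^ k := Nat.mod_lt _ (by positivity)
    rw [Int.emod_eq_of_lt (by omega) (by omega)]
    omega

lemma intShiftLeft_natCast (n u : Nat) : ((n : Int) <<< u) = ((n <<< u : Nat) : Int) := by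
  rw [Int.shiftLeft_eq, Nat.shiftLeft_eq]; push_cast; ring

lemma shiftLeft_toNat (x : Int) (hx : 0 ≤ x) (u : Nat) : x <<< u = ((x.toNat <<< u : Nat) : Int) := by
  conv_lhs => rw [← Int.toNat_of_nonneg hx]
  exact intShiftLeft_natCast _ _

lemma band_shiftLeft (x y : Int) (u : Nat) (hy : 0 ≤ y) :
    PySem.Int.band (x <<< u) (y <<< u) = (PySem.Int.band x y) <<< u := by
  have hyu : y <<< u = ((y.toNat <<< u : Nat) : Int) := shiftLeft_toNat y hy u
  have hyu' : (0:Int) ≤ y <<< u := by rw [hyu]; positivity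
  by_cases hx : 0 ≤ x
  · have hxu : x <<< u = ((x.toNat <<< u : Nat) : Int) := shiftLeft_toNat x hx u
    have hxu' : (0:Int) ≤ x <<< u := by rw [hxu]; positivity
    simp only [PySem.Int.band, if_pos hx, if_pos hy, if_pos hxu', if_pos hyu']
    rw [show (x <<< u).toNat = x.toNat <<< u from by rw [hxu]; exact Int.toNat_natCast _,
      show (y <<< u).toNat = y.toNat <<< u from by rw [hyu]; exact Int.toNat_natCast _]
    rw [natAnd_shiftLeft]
    have hrs : (y.toNat <<< u) >>> u = y.toNat := by
      rw [Nat.shiftLeft_eq, Nat.shiftRight_eq_div_pow, Nat.mul_div_cancel _ (by positivity)]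
    rw [hrs, intShiftLeft_natCast]
  · push Not at hx
    have hxu : x <<< u < 0 := by
      rw [Int.shiftLeft_eq]
      exact mul_neg_of_neg_of_pos hx (by positivity)
    set W := (-x - 1).toNat with hW
    have hWx : (W : Int) = -x - 1 := by omega
    have hneg : (-(x <<< u) - 1) = ((W <<< u + (2 ^ u - 1) : Nat) : Int) := by
      rw [Int.shiftLeft_eq, Nat.shiftLeft_eq]
      push_cast [Nat.cast_sub (Nat.one_le_two_pow)]
      linear_combination -(2:Int) ^ u * hWx
    simp only [PySem.Int.band, if_neg (not_le.2 hx), if_neg (not_le.2 hxu), if_pos hy,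
      if_pos hyu']
    rw [show (y <<< u).toNat = y.toNat <<< u from by rw [hyu]; exact Int.toNat_natCast _,
      show (-(x <<< u) - 1).toNat = W <<< u + (2 ^ u - 1) from by rw [hneg]; exact Int.toNat_natCast _]
    rw [natAnd_shiftLeft]
    have hrs : (W <<< u + (2 ^ u - 1)) >>> u = W := by
      rw [Nat.shiftLeft_eq, Nat.shiftRight_eq_div_pow, Nat.add_comm,
        Nat.add_mul_div_right _ _ (by positivity : 0 < 2 ^ u), Nat.div_eq_of_lt (by have h : (1:Nat) ≤ 2^u := Nat.one_le_two_pow; omega)]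
      omega
    rw [hrs]
    have hsub : y.toNat <<< u - (y.toNat &&& W) <<< u = (y.toNat - (y.toNat &&& W)) <<< u := by
      simp [Nat.shiftLeft_eq, Nat.sub_mul]
    rw [hsub, intShiftLeft_natCast]

lemma hxorMask (u : Nat) (hu : u ≤ 8) :
    PySem.Int.bxor (2 ^ u - 1) 0xff = ((2:Int) ^ (8 - u) - 1) <<< u := by
  interval_cases u <;> decide

lemma byte0_eq (x : Int) (u : Nat) (hu : u ≤ 8) :
    PySem.Int.band (x <<< u) (PySem.Int.bxor (2 ^ u - 1) 0xff) = (x <<< u) % 256 := by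
  rw [hxorMask u hu]
  have h1 : (0:Int) ≤ 2 ^ (8-u) - 1 := by
    have : (0:Int) < 2 ^ (8-u) := by positivity
    omega
  rw [band_shiftLeft _ _ _ h1, bandM, Int.shiftLeft_eq, Int.shiftLeft_eq]
  have h256 : (256 : Int) = 2 ^ u * 2 ^ (8-u) := by
    rw [← pow_add, show u + (8 - u) = 8 from by omega]
    rfl
  rw [h256, mul_comm x ((2:Int)^u), Int.mul_emod_mul_of_pos _ _ (by positivity)]
  ring

lemma modMask_shift_byte (x : Int) (X Y : Nat) (h : Y + 8 ≤ X) :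
    ((x % 2 ^ X) / 2 ^ Y) % 256 = (x / 2 ^ Y) % 256 := by
  have h1 : x % 2 ^ X = x + (-(x / 2 ^ X)) * 2 ^ X := by
    rw [Int.emod_def]
    ring
  have hXY : (2:Int) ^ X = 2 ^ (X - Y) * 2 ^ Y := by
    rw [← pow_add]
    congr 1
    omega
  rw [h1, show (-(x / 2 ^ X)) * 2 ^ X = (-(x / 2 ^ X) * 2 ^ (X-Y)) * 2 ^ Y from by
    rw [mul_assoc, ← hXY],
    Int.add_mul_ediv_right _ _ (by positivity : (0:Int) < 2 ^ Y).ne']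
  have h2 : (-(x / 2 ^ X) * 2 ^ (X-Y)) = (-(x / 2 ^ X) * 2 ^ (X-Y-8)) * 256 := by
    rw [show (256:Int) = 2 ^ 8 from rfl, mul_assoc, ← pow_add,
      show X - Y - 8 + 8 = X - Y from by omega]
  rw [h2]
  generalize -(x / 2 ^ X) * 2 ^ (X - Y - 8) = b
  omega

lemma tobyte_eq (x : Int) (q i : Nat) (hi : i < q) :
    PySem.Int.band ((PySem.Int.band x (2 ^ (8*q) - 1)) >>> (8*i)) 0xff = (x / 2 ^ (8*i)) % 256 := by
  rw [bandM x (8*q), show (0xff:Int) = 2 ^ 8 - 1 from rfl, bandM, Int.shiftRight_eq_div_pow]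
  push_cast
  exact modMask_shift_byte x (8*q) (8*i) (by omega)

lemma shiftLeft_shiftRight_cancel (x : Int) (u v : Nat) (h : u ≤ v) :
    (x <<< u) >>> v = x >>> (v - u) := by
  rw [Int.shiftLeft_shiftRight_eq, Nat.sub_eq_zero_of_le h, Int.shiftLeft_zero]

lemma shiftRight_eq_zero_iff (x : Int) (n : Nat) : x >>> n = 0 ↔ 0 ≤ x ∧ x < 2 ^ n := by
  rw [Int.shiftRight_eq_div_pow]
  have hpos : (0:Int) < ((2 ^ n : Nat) : Int) := by positivity
  constructor
  · intro h
    refine ⟨?_, ?_⟩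
    · by_contra hx
      have := Int.ediv_neg_of_neg_of_pos (by omega : x < 0) hpos
      omega
    · by_contra hx
      have h1 : (1:Int) ≤ x / ((2 ^ n : Nat) : Int) := by
        rw [Int.le_ediv_iff_mul_le hpos]
        push_cast
        push_cast at hx
        omega
      omega
  · rintro ⟨h1, h2⟩
    apply Int.ediv_eq_zero_of_lt h1
    exact_mod_cast h2

lemma midByte (x : Int) (a : Nat) : PySem.Int.band (x >>> a) 0xff = (x / 2 ^ a) % 256 := by
  rw [show (0xff:Int) = 2 ^ 8 - 1 from rfl, bandM, Int.shiftRight_eq_div_pow]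
  push_cast
  rfl

lemma one_shiftLeft_int (n : Nat) : (1:Int) <<< n - 1 = 2 ^ n - 1 := by
  rw [Int.shiftLeft_eq, one_mul]

-- number of iterations of A's while-loop, as a Nat
def gnbMid (r : Int) : Nat := (r - 1).toNat / 8

-- A's loop, characterised in closed form: it shifts gnbMid r bytes out of output_code
lemma gnbLoop_closed (n : Nat) : ∀ (q r : Int) (acc : List Int), gnbMid r = n →
    gnbLoop q r acc =
      (q >>> (8 * n), r - 8 * n,
        acc ++ (List.range n).map (fun (i : Nat) => PySem.Int.band (q >>> (8 * i)) 0xff)) := by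
  induction n with
  | zero =>
    intro q r acc hn
    have hr : ¬ r > 8 := by unfold gnbMid at hn; omega
    rw [gnbLoop]
    simp [hr]
  | succ n ih =>
    intro q r acc hn
    have hr : r > 8 := by unfold gnbMid at hn; omega
    have hn' : gnbMid (r - 8) = n := by unfold gnbMid at hn ⊢; omega
    rw [gnbLoop]
    simp only [hr, if_pos]
    rw [ih _ _ _ hn']
    simp only [Prod.mk.injEq]
    refine ⟨?_, by push_cast; ring, ?_⟩
    · rw [← Int.shiftRight_add]
      congr 1
      omega
    · rw [List.range_succ_eq_map, List.map_cons, List.map_map]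
      simp only [List.append_assoc, List.singleton_append]
      have hstep : ∀ i : Nat, q >>> (8:Nat) >>> (8 * i : Nat) = q >>> (8 * (i + 1) : Nat) := by
        intro i
        rw [← Int.shiftRight_add]
        congr 1
        omega
      refine congrArg _ ?_
      rw [show (8:Nat) * 0 = 0 from rfl]
      congr 1
      · rw [Int.shiftRight_zero]
      · refine List.map_congr_left ?_
        intro a _
        simp only [Function.comp_apply, Nat.succ_eq_add_one]
        rw [hstep a]

-- ===== VERDICT (by name: the statement is the Claim_ definition above) =====
theorem get_next_byte_spec : Claim_unchanged_get_next_byte := by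
  intro oc buf rbc cbl _ hpre hnd
  obtain ⟨h0, h8, hc⟩ := hpre
  set u : Nat := (8 - rbc).toNat with hu
  have hu8 : u ≤ 8 := by omega
  set r : Nat := (cbl - rbc).toNat with hr
  -- closed form of A's loop
  have hmidv : gnbMid (cbl - rbc) = (r - 1) / 8 := by unfold gnbMid; omega
  -- B's bookkeeping
  have hnf : PySem.Int.floordiv ((8 - rbc) + cbl) 8 = ((r / 8 + 1 : Nat) : Int) := by
    rw [PySem.Int.floordiv_eq_ediv_of_pos (by norm_num)]
    omega
  have hlf : PySem.Int.mod ((8 - rbc) + cbl) 8 = ((r % 8 : Nat) : Int) := by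
    rw [PySem.Int.mod_eq_emod_of_pos (by norm_num)]
    omega
  set q : Nat := r / 8 + 1 with hq
  have hnfq : (((q:Nat):Int)).toNat = q := Int.toNat_natCast q
  have h8nfq : ((8:Int) * ((q:Nat):Int)).toNat = 8 * q := by omega
  -- the combined integer and its bytes
  have hcomb : ∀ v : Nat, u ≤ v → (oc <<< u) / 2 ^ v = oc / 2 ^ (v - u) := by
    intro v hv
    have h := shiftLeft_shiftRight_cancel oc u v hv
    rw [Int.shiftRight_eq_div_pow, Int.shiftRight_eq_div_pow] at h
    push_cast at h
    exact h
  have hmid : ∀ i : Nat, PySem.Int.band (oc >>> rbc.toNat >>> (8 * i)) 0xff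
      = ((oc <<< u) / 2 ^ (8 * (i + 1))) % 256 := by
    intro i
    rw [← Int.shiftRight_add, midByte, hcomb (8 * (i + 1)) (by omega),
      show 8 * (i + 1) - u = rbc.toNat + 8 * i from by omega]
  have hb0 : PySem.Int.band (oc <<< u) (PySem.Int.bxor (2 ^ u - 1) 0xff)
      = ((oc <<< u) / 2 ^ (8 * 0)) % 256 := by
    rw [byte0_eq oc u hu8]
    norm_num
  -- B's byte list in canonical form
  have hblist : pyToBytesLE (PySem.Int.band (oc <<< u) ((1:Int) <<< (8 * q) - 1)) q
      = (List.range q).map (fun i => ((oc <<< u) / 2 ^ (8 * i)) % 256) := by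
    unfold pyToBytesLE
    refine List.map_congr_left ?_
    intro i hi
    rw [one_shiftLeft_int]
    exact tobyte_eq _ q i (List.mem_range.mp hi)
  simp only [get_next_byte, get_next_byte_alt, ← hu, hnf, hlf, h8nfq, hnfq]
  rw [gnbLoop_closed (gnbMid (cbl - rbc)) _ _ _ rfl, hmidv]
  dsimp only
  rw [hblist, show q = (q - 1) + 1 from by omega, List.range_succ_eq_map, List.map_cons,
    List.map_map]
  dsimp only
  by_cases hl : r % 8 = 0
  · by_cases hr0 : r = 0
    · -- cbl = rbc: one byte, empty loop, else-branches on both sides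
      have hq1 : q - 1 = 0 := by omega
      have hmid0 : (r - 1) / 8 = 0 := by omega
      rw [hq1, hmid0]
      have hrem : cbl - rbc - 8 * ((0:Nat) : Int) = 0 := by push_cast; omega
      rw [hrem, if_neg (by norm_num), if_neg (by omega)]
      simp only [List.range_zero, List.map_nil, List.append_nil]
      rw [Prod.mk.injEq, Prod.mk.injEq]
      refine ⟨?_, ?_, by norm_num⟩
      · rw [hb0]
        norm_num [add_comm]
      · simp
    · -- full bytes exactly: A appends the tail byte, B's last byte is it, masked = unmasked by ¬D
      have hnmid : (r - 1) / 8 = r / 8 - 1 := by omega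
      have hrem : cbl - rbc - 8 * ((r - 1 : Nat) / 8 : Nat) = 8 := by
        have : (r - 1) / 8 = r / 8 - 1 := hnmid
        omega
      rw [hrem, if_pos rfl, if_neg (by simp [hl])]
      -- ¬D gives 0 ≤ oc < 2^cbl
      have hD : oc >>> cbl.toNat = 0 := by
        by_contra hne
        exact hnd ⟨by omega, by omega, hne⟩
      rw [shiftRight_eq_zero_iff] at hD
      obtain ⟨hoc0, hoclt⟩ := hD
      set m : Nat := r / 8 - 1 with hm
      have hqm : q = m + 2 := by omega
      have hlast : oc >>> rbc.toNat >>> (8 * m) = ((oc <<< u) / 2 ^ (8 * (m + 1))) % 256 := by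
        rw [← Int.shiftRight_add, Int.shiftRight_eq_div_pow]
        have hidx : rbc.toNat + 8 * m = 8 * (m + 1) - u := by omega
        push_cast
        rw [hidx, ← hcomb (8 * (m + 1)) (by omega)]
        set d : Int := (oc <<< u) / 2 ^ (8 * (m + 1)) with hd
        have hcombnn : 0 ≤ oc <<< u := by
          rw [Int.shiftLeft_eq]
          positivity
        have hcomblt : oc <<< u < 2 ^ (8 * (m + 1)) * 256 := by
          rw [Int.shiftLeft_eq]
          calc oc * 2 ^ u < 2 ^ cbl.toNat * 2 ^ u := by
                have h2u : (0:Int) < 2 ^ u := by positivity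
                exact mul_lt_mul_of_pos_right hoclt h2u
            _ ≤ 2 ^ (8 * (m + 1)) * 256 := by
                rw [show (256:Int) = 2 ^ 8 from rfl, ← pow_add, ← pow_add]
                apply pow_le_pow_right₀ (by norm_num)
                omega
        have hd0 : 0 ≤ d := Int.ediv_nonneg hcombnn (by positivity)
        have hdlt : d < 256 := by
          rw [hd, Int.ediv_lt_iff_lt_mul (by positivity), mul_comm]
          exact hcomblt
        rw [Int.emod_eq_of_lt hd0 hdlt]
      have hqm' : q - 1 = m + 1 := by omega
      rw [hqm', List.range_succ, List.map_append, List.map_cons, List.map_nil]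
      rw [Prod.mk.injEq, Prod.mk.injEq]
      refine ⟨?_, rfl, rfl⟩
      have hmaps : List.map (fun (i : Nat) => PySem.Int.band (oc >>> rbc.toNat >>> (8 * i)) 255)
          (List.range m)
          = List.map ((fun i => oc <<< u / 2 ^ (8 * i) % 256) ∘ Nat.succ) (List.range m) := by
        refine List.map_congr_left ?_
        intro i _
        rw [hmid i]
        simp [Function.comp, Nat.succ_eq_add_one]
      rw [hb0, hnmid, hlast, hmaps]
      simp only [List.cons_append, List.nil_append, Function.comp_apply, Nat.succ_eq_add_one]
      rw [add_comm buf]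
  · -- leftover bits go to the buffer: else-branch of A, if-branch of B
    have hnmid : (r - 1) / 8 = r / 8 := by omega
    have hrem : cbl - rbc - 8 * ((r - 1 : Nat) / 8 : Nat) = ((r % 8 : Nat) : Int) := by
      rw [hnmid]
      omega
    have hq1' : q - 1 = r / 8 := by omega
    rw [hrem, if_neg (by omega), if_pos (by omega), hq1']
    rw [Prod.mk.injEq, Prod.mk.injEq]
    refine ⟨?_, ?_, by omega⟩
    · -- byte lists
      rw [hb0]
      simp only [List.singleton_append]
      congr 1
      · omega
      · rw [hnmid]
        refine List.map_congr_left ?_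
        intro i _
        rw [hmid i]
        simp [Function.comp, Nat.succ_eq_add_one]
    · -- buffer value
      rw [← Int.shiftRight_add, one_shiftLeft_int]
      have hidx : rbc.toNat + 8 * (r / 8) = 8 * q - u := by omega
      have hsh : oc >>> (rbc.toNat + 8 * (r / 8)) = (oc <<< u) >>> (8 * q) := by
        rw [shiftLeft_shiftRight_cancel oc u (8 * q) (by omega), hidx]
      rw [hnmid, hsh]

theorem get_next_byte_changed : Claim_changed_get_next_byte := by
  unfold Claim_changed_get_next_byte
  refine ⟨by decide, by decide, by decide, ?_, by decide, by decide⟩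
  show get_next_byte (-1) 0 0 8 = ([0, -1], 0, 8)
  rw [get_next_byte]
  rw [gnbLoop]
  norm_num
  decide

theorem get_next_byte_tight : Claim_exact_get_next_byte := by
  intro oc buf rbc cbl _ hpre hd
  obtain ⟨h0, h8, hc⟩ := hpre
  obtain ⟨hd1, hd2, hd3⟩ := hd
  set u : Nat := (8 - rbc).toNat with hu
  have hu8 : u ≤ 8 := by omega
  set r : Nat := (cbl - rbc).toNat with hr
  have hl : r % 8 = 0 := by omega
  have hr0 : r ≠ 0 := by omega
  have hmidv : gnbMid (cbl - rbc) = (r - 1) / 8 := by unfold gnbMid; omega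
  have hnf : PySem.Int.floordiv ((8 - rbc) + cbl) 8 = ((r / 8 + 1 : Nat) : Int) := by
    rw [PySem.Int.floordiv_eq_ediv_of_pos (by norm_num)]
    omega
  have hlf : PySem.Int.mod ((8 - rbc) + cbl) 8 = ((r % 8 : Nat) : Int) := by
    rw [PySem.Int.mod_eq_emod_of_pos (by norm_num)]
    omega
  set q : Nat := r / 8 + 1 with hq
  have hnfq : (((q:Nat):Int)).toNat = q := Int.toNat_natCast q
  have h8nfq : ((8:Int) * ((q:Nat):Int)).toNat = 8 * q := by omega
  have hcomb : ∀ v : Nat, u ≤ v → (oc <<< u) / 2 ^ v = oc / 2 ^ (v - u) := by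
    intro v hv
    have h := shiftLeft_shiftRight_cancel oc u v hv
    rw [Int.shiftRight_eq_div_pow, Int.shiftRight_eq_div_pow] at h
    push_cast at h
    exact h
  have hblist : pyToBytesLE (PySem.Int.band (oc <<< u) ((1:Int) <<< (8 * q) - 1)) q
      = (List.range q).map (fun i => ((oc <<< u) / 2 ^ (8 * i)) % 256) := by
    unfold pyToBytesLE
    refine List.map_congr_left ?_
    intro i hi
    rw [one_shiftLeft_int]
    exact tobyte_eq _ q i (List.mem_range.mp hi)
  set m : Nat := r / 8 - 1 with hm
  have hnmid : (r - 1) / 8 = m := by omega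
  have hqm' : q - 1 = m + 1 := by omega
  have hrem : cbl - rbc - 8 * ((r - 1 : Nat) / 8 : Nat) = 8 := by
    rw [hnmid]
    omega
  -- the unmasked tail byte of A, as a division
  set d : Int := (oc <<< u) / 2 ^ (8 * (m + 1)) with hdd
  have htA : oc >>> rbc.toNat >>> (8 * m) = d := by
    rw [← Int.shiftRight_add, Int.shiftRight_eq_div_pow]
    push_cast
    rw [show rbc.toNat + 8 * m = 8 * (m + 1) - u from by omega,
      ← hcomb (8 * (m + 1)) (by omega)]
  -- d is out of byte range
  have hd4 : ¬ (0 ≤ oc ∧ oc < 2 ^ cbl.toNat) :=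
    fun h => hd3 ((shiftRight_eq_zero_iff _ _).mpr h)
  have hdrange : d < 0 ∨ 256 ≤ d := by
    by_cases hoc : 0 ≤ oc
    · right
      have hoc2 : 2 ^ cbl.toNat ≤ oc := by
        by_cases hlt : oc < 2 ^ cbl.toNat
        · exact absurd ⟨hoc, hlt⟩ hd4
        · omega
      rw [hdd, Int.le_ediv_iff_mul_le (pow_pos (by norm_num : (0:Int) < 2) (8 * (m + 1)))]
      calc (256:Int) * 2 ^ (8 * (m + 1)) = 2 ^ cbl.toNat * 2 ^ u := by
            rw [show (256:Int) = 2 ^ 8 from rfl, ← pow_add, ← pow_add]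
            congr 1
            omega
        _ ≤ oc * 2 ^ u :=
            mul_le_mul_of_nonneg_right hoc2 (le_of_lt (pow_pos (by norm_num : (0:Int) < 2) u))
        _ = oc <<< u := (Int.shiftLeft_eq oc u).symm
    · left
      rw [hdd]
      apply Int.ediv_neg_of_neg_of_pos
      · rw [Int.shiftLeft_eq]
        exact mul_neg_of_neg_of_pos (by omega) (pow_pos (by norm_num : (0:Int) < 2) u)
      · exact pow_pos (by norm_num : (0:Int) < 2) (8 * (m + 1))
  -- reduce both ports and compare the last byte
  intro heq
  rw [get_next_byte, get_next_byte_alt] at heq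
  simp only [← hu, hnf, hlf, h8nfq, hnfq] at heq
  rw [gnbLoop_closed (gnbMid (cbl - rbc)) _ _ _ rfl, hmidv] at heq
  dsimp only at heq
  rw [hblist, show q = (q - 1) + 1 from by omega, List.range_succ_eq_map, List.map_cons,
    List.map_map] at heq
  dsimp only at heq
  rw [hrem, if_pos rfl, if_neg (by omega), hqm', List.range_succ, List.map_append,
    List.map_cons, List.map_nil, hnmid, htA] at heq
  have hlasts := congrArg (fun p : List Int × Int × Int => p.1.getLast?) heq
  simp only [← List.cons_append, List.getLast?_concat,
    Function.comp_apply, Nat.succ_eq_add_one, Option.some.injEq] at hlasts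
  omega
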